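-- pv_equiv track=rewrite | github.com/Krista/wikiToLatex | wikiprojekt/skuska.py | convertWikiBoldItalic
-- ===== SOURCE A (Python) =====
-- def convertWikiBoldItalic(text):
--     kde = 1
--     #if text.startswith("'''"):
--     #    kde = 0
--     pom = text.split("'''")
--     for i in range(len(pom)):
--         if i % 2 == kde:
--             pom[i] = "\\textbf{" + pom[i] + "}"
--     pom = ''.join(pom)
--     pom = pom.split("''")
--     for i in range(len(pom)):
--         if i % 2 == kde:
--             pom[i] = "\\textit{" + pom[i] + "}"
--     return ''.join(pom)
-- ===== SOURCE B (Python) =====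
-- def _pass(text, marker, cmd):
--     out = []
--     i = 0
--     open_ = False
--     m = len(marker)
--     n = len(text)
--     while i < n:
--         if text.startswith(marker, i):
--             out.append('}' if open_ else cmd)
--             open_ = not open_
--             i += m
--         else:
--             out.append(text[i])
--             i += 1
--     if open_:
--         out.append('}')
--     return ''.join(out)
--
-- def convertWikiBoldItalic(text):
--     return _pass(_pass(text, "'''", "\\textbf{"), "''", "\\textit{")
-- ===== Notes on version B (the rewrite author's own statement) =====
-- stated objective: alternative
-- what changed: Replaces each split/alternate-wrap/join pass with a single left-to-right scan that copies characters and flips an open/close flag at each marker, appending a closing brace if a marker is left open.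
import Mathlib
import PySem

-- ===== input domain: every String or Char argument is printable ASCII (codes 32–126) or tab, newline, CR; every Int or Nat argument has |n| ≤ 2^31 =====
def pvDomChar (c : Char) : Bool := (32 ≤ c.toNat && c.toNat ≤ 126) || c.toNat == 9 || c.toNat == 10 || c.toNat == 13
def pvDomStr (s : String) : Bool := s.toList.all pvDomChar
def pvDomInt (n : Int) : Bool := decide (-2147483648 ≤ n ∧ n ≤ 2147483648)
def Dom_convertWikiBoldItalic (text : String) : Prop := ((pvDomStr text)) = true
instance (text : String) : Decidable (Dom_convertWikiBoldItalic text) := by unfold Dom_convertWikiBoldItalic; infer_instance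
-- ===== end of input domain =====

-- B replaces each split/alternate-wrap/join pass by one left-to-right scan with an
-- open/close flag (alternative decomposition; same output).

-- ===== PORT A =====
-- literal transliteration: split on the marker, wrap odd-indexed pieces, join; twice.
def convertWikiBoldItalic (text : String) : String :=
  let pom := PySem.Chars.splitOn text.toList "'''".toList
  let pom := (List.range pom.length).foldl (fun pom i =>
      if i % 2 = 1 then pom.set i ("\\textbf{".toList ++ pom.getD i [] ++ "}".toList) else pom) pom
  let pom := PySem.Chars.join [] pom
  let pom2 := PySem.Chars.splitOn pom "''".toList
  let pom2 := (List.range pom2.length).foldl (fun pom i =>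
      if i % 2 = 1 then pom.set i ("\\textit{".toList ++ pom.getD i [] ++ "}".toList) else pom) pom2
  String.mk (PySem.Chars.join [] pom2)

-- ===== PORT B =====
-- Source B's scan: i += len(marker) after a match; here `rest.drop (sep.length - 1)` is
-- exactly that advance for the (nonempty) markers Source B uses.
def scanGo (sep cmd : List Char) : Bool → List Char → List Char
  | o, [] => if o then ['}'] else []
  | o, c :: rest =>
    if sep.isPrefixOf (c :: rest) then
      (if o then ['}'] else cmd) ++ scanGo sep cmd (!o) (rest.drop (sep.length - 1))
    else
      c :: scanGo sep cmd o rest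
termination_by _ s => s.length
decreasing_by all_goals (simp; try omega)

def convertWikiBoldItalic_alt (text : String) : String :=
  String.mk (scanGo "''".toList "\\textit{".toList false
    (scanGo "'''".toList "\\textbf{".toList false text.toList))

-- ===== PRECONDITION & SPEC =====
def Spec_convertWikiBoldItalic (text : String) (out : String) : Prop := out = convertWikiBoldItalic_alt text
instance (text : String) (out : String) : Decidable (Spec_convertWikiBoldItalic text out) := by unfold Spec_convertWikiBoldItalic; infer_instance

-- ===== CLAIM (what is proved, stated in full; the proofs are below) =====
def Claim_equal_convertWikiBoldItalic : Prop := ∀ (text : String), Dom_convertWikiBoldItalic text → Spec_convertWikiBoldItalic text (convertWikiBoldItalic text)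

-- ===== LEMMAS AND PROOFS =====

-- recursive characterisation of Python str.split (nonempty separator)
def split1 (sep : List Char) : List Char → List (List Char)
  | [] => [[]]
  | c :: rest =>
    if sep.isPrefixOf (c :: rest) then [] :: split1 sep (rest.drop (sep.length - 1))
    else
      match split1 sep rest with
      | [] => [[c]]
      | h :: t => (c :: h) :: t
termination_by s => s.length
decreasing_by all_goals (simp; try omega)

theorem split1_ne_nil (sep : List Char) (s : List Char) : split1 sep s ≠ [] := by
  induction s using split1.induct sep with
  | case1 => simp [split1]
  | case2 c rest hpre ih => simp [split1, hpre]
  | case3 c rest hpre h ih => simp [split1, hpre, h]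
  | case4 c rest hpre hd tl h ih => simp [split1, hpre, h]

theorem splitOn_go_eq (sep : List Char) (hs : sep ≠ []) :
    ∀ (fuel : Nat) (l cur acc : _), l.length ≤ fuel →
      PySem.Chars.splitOn.go sep fuel l cur acc =
        acc.reverse ++ (match split1 sep l with
          | [] => [cur.reverse]
          | h :: t => (cur.reverse ++ h) :: t) := by
  intro fuel
  induction fuel with
  | zero =>
    intro l cur acc hl
    have : l = [] := List.length_eq_zero_iff.mp (Nat.le_zero.mp hl)
    subst this
    simp [PySem.Chars.splitOn.go, split1]
  | succ fuel ih =>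
    intro l cur acc hl
    match l with
    | [] => simp [PySem.Chars.splitOn.go, split1]
    | c :: rest =>
      rw [PySem.Chars.splitOn.go]
      by_cases hpre : sep.isPrefixOf (c :: rest) = true
      · simp only [hpre, if_true]
        have hdrop : List.drop sep.length (c :: rest) = rest.drop (sep.length - 1) := by
          obtain ⟨a, sep', rfl⟩ : ∃ a sep', sep = a :: sep' := by
            cases sep with
            | nil => exact absurd rfl hs
            | cons a sep' => exact ⟨a, sep', rfl⟩
          simp
        rw [hdrop, ih _ _ _ (by simp at hl ⊢; omega)]
        have hne := split1_ne_nil sep (rest.drop (sep.length - 1))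
        match hsp : split1 sep (rest.drop (sep.length - 1)) with
        | [] => exact absurd hsp hne
        | h :: t => simp [split1, hpre, hsp]
      · simp only [hpre, if_false, Bool.false_eq_true]
        rw [ih _ _ _ (by simp at hl ⊢; omega)]
        have hne := split1_ne_nil sep rest
        match hsp : split1 sep rest with
        | [] => exact absurd hsp hne
        | h :: t => simp [split1, hpre, hsp]

theorem splitOn_eq_split1 (sep : List Char) (hs : sep ≠ []) (s : List Char) :
    PySem.Chars.splitOn s sep = split1 sep s := by
  rw [PySem.Chars.splitOn, splitOn_go_eq sep hs _ _ _ _ (by omega)]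
  have hne := split1_ne_nil sep s
  match hsp : split1 sep s with
  | [] => exact absurd hsp hne
  | h :: t => simp

-- the wrap-odd-indices loop of A as a mapIdx
theorem fold_set_eq_mapIdx (cmd : List Char) (l : List (List Char)) :
    ∀ n, n ≤ l.length →
      (List.range n).foldl (fun pom i =>
          if i % 2 = 1 then pom.set i (cmd ++ pom.getD i [] ++ "}".toList) else pom) l =
        l.mapIdx (fun i a => if i < n ∧ i % 2 = 1 then cmd ++ a ++ "}".toList else a) := by
  intro n
  induction n with
  | zero =>
    intro _
    apply List.ext_getElem (by simp)
    intro i hi hi'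
    simp [List.getElem_mapIdx]
  | succ n ih =>
    intro hn
    rw [List.range_succ, List.foldl_append, ih (by omega)]
    simp only [List.foldl_cons, List.foldl_nil]
    have hlen : (l.mapIdx (fun i a => if i < n ∧ i % 2 = 1 then cmd ++ a ++ "}".toList else a)).length = l.length := by simp
    by_cases hpar : n % 2 = 1
    · rw [if_pos hpar]
      have hget : (l.mapIdx (fun i a => if i < n ∧ i % 2 = 1 then cmd ++ a ++ "}".toList else a)).getD n [] = l[n]'(by omega) := by
        rw [List.getD_eq_getElem _ _ (by omega), List.getElem_mapIdx]
        simp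
      rw [hget]
      apply List.ext_getElem (by simp)
      intro i hi hi'
      rw [List.getElem_set, List.getElem_mapIdx, List.getElem_mapIdx]
      by_cases hin : n = i
      · subst hin; simp [hpar]
      · split_ifs with h1 h2 h2 <;> first | rfl | omega
    · rw [if_neg hpar]
      apply List.ext_getElem (by simp)
      intro i hi hi'
      rw [List.getElem_mapIdx, List.getElem_mapIdx]
      split_ifs with h1 h2 h2 <;> first | rfl | omega

-- "wrap every odd-indexed part" as a single-step alternation
def gAlt (cmd : List Char) : Bool → List (List Char) → List Char
  | _, [] => []
  | o, p :: ps => (if o then cmd ++ p ++ "}".toList else p) ++ gAlt cmd (!o) ps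

theorem join_nil_cons (a : List Char) (l : List (List Char)) :
    PySem.Chars.join [] (a :: l) = a ++ PySem.Chars.join [] l := by
  match l with
  | [] => simp [PySem.Chars.join_singleton, PySem.Chars.join_nil]
  | b :: l' => simp [PySem.Chars.join_cons_cons]

theorem join_mapIdx_eq_gAlt (cmd : List Char) :
    ∀ (parts : List (List Char)) (k : Nat),
      PySem.Chars.join [] (parts.mapIdx (fun i a => if (i + k) % 2 = 1 then cmd ++ a ++ "}".toList else a)) =
        gAlt cmd (decide (k % 2 = 1)) parts := by
  intro parts
  induction parts with
  | nil => intro k; simp [gAlt, PySem.Chars.join_nil]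
  | cons p ps ih =>
    intro k
    rw [List.mapIdx_cons, join_nil_cons]
    have hshift : (ps.mapIdx fun i a => if (i + 1 + k) % 2 = 1 then cmd ++ a ++ "}".toList else a) =
        ps.mapIdx (fun i a => if (i + (k + 1)) % 2 = 1 then cmd ++ a ++ "}".toList else a) := by
      apply List.ext_getElem (by simp)
      intro i hi hi'
      rw [List.getElem_mapIdx, List.getElem_mapIdx, show i + 1 + k = i + (k + 1) by omega]
    rw [hshift, ih (k + 1)]
    by_cases h : k % 2 = 1
    · have h1 : ¬ (k + 1) % 2 = 1 := by omega
      simp [gAlt, h, h1]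
    · have h1 : (k + 1) % 2 = 1 := by omega
      simp [gAlt, h, h1]

theorem scanGo_eq_gAlt (sep cmd : List Char) (hs : sep ≠ []) :
    ∀ (s : List Char),
      scanGo sep cmd false s = gAlt cmd false (split1 sep s) ∧
      cmd ++ scanGo sep cmd true s = gAlt cmd true (split1 sep s) := by
  intro s
  induction s using split1.induct sep with
  | case1 => simp [scanGo, split1, gAlt]
  | case2 c rest hpre ih =>
    rw [split1, if_pos hpre]
    constructor
    · rw [scanGo, if_pos hpre]
      simp only [gAlt, Bool.not_false, if_neg (by simp : ¬ (false = true)), List.nil_append]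
      exact ih.2
    · rw [scanGo, if_pos hpre]
      simp only [gAlt, Bool.not_true, if_pos rfl, List.append_nil]
      rw [← ih.1]
      simp
  | case3 c rest hpre h ih => exact absurd h (split1_ne_nil sep rest)
  | case4 c rest hpre hd tl h ih =>
    rw [split1, if_neg (by simp [hpre]), h]
    rw [h] at ih
    constructor
    · rw [scanGo, if_neg (by simp [hpre]), ih.1]
      simp [gAlt]
    · rw [scanGo, if_neg (by simp [hpre])]
      have htl : scanGo sep cmd true rest = hd ++ "}".toList ++ gAlt cmd false tl := by
        have := ih.2
        simp only [gAlt, if_pos rfl, Bool.not_true] at this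
        have h2 : cmd ++ scanGo sep cmd true rest = cmd ++ (hd ++ "}".toList ++ gAlt cmd false tl) := by
          rw [this]; simp
        exact List.append_cancel_left h2
      rw [htl]
      simp [gAlt]

-- one full pass of A equals one scan pass of B
theorem passA_eq_scan (sep cmd : List Char) (hs : sep ≠ []) (s : List Char) :
    PySem.Chars.join []
      ((List.range (PySem.Chars.splitOn s sep).length).foldl (fun pom i =>
          if i % 2 = 1 then pom.set i (cmd ++ pom.getD i [] ++ "}".toList) else pom)
        (PySem.Chars.splitOn s sep)) = scanGo sep cmd false s := by
  rw [fold_set_eq_mapIdx cmd _ _ le_rfl]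
  have hcongr : ((PySem.Chars.splitOn s sep).mapIdx fun i a =>
        if i < (PySem.Chars.splitOn s sep).length ∧ i % 2 = 1 then cmd ++ a ++ "}".toList else a) =
      (PySem.Chars.splitOn s sep).mapIdx (fun i a => if (i + 0) % 2 = 1 then cmd ++ a ++ "}".toList else a) := by
    apply List.ext_getElem (by simp)
    intro i hi hi'
    rw [List.getElem_mapIdx, List.getElem_mapIdx]
    simp at hi
    split_ifs with h1 h2 h2 <;> first | rfl | omega
  rw [hcongr, join_mapIdx_eq_gAlt, splitOn_eq_split1 sep hs, show decide ((0:Nat) % 2 = 1) = false from rfl,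
      (scanGo_eq_gAlt sep cmd hs s).1]

-- ===== VERDICT (by name: the statement is the Claim_ definition above) =====
theorem convertWikiBoldItalic_spec : Claim_equal_convertWikiBoldItalic := by
  intro text _
  unfold Spec_convertWikiBoldItalic convertWikiBoldItalic convertWikiBoldItalic_alt
  simp only []
  rw [passA_eq_scan _ _ (by decide), passA_eq_scan _ _ (by decide)]
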